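-- pv_equiv track=rewrite | github.com/tinoking63/Projects | submission_004-problem/practice.py | find_all_possible_strings
-- ===== SOURCE A (Python) =====
-- def find_all_possible_strings(character_sets,n):
--     result = []
--     #prefix = []
--     for char in character_sets:
--         if type(char) != str:
--             return []
--     length = len(character_sets)
--     character_combo(character_sets, n, result, "", length)
--     return result
--
-- def character_combo(character_sets, n, result, prefix, length):
--     if n == 0:
--         result.append(prefix)
--         return result
--     for x in range(length):
--         new_set = prefix + character_sets[x]
--         character_combo(character_sets,n-1 ,result, new_set, length)
-- ===== SOURCE B (Python) =====
-- def find_all_possible_strings(character_sets, n):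
--     for char in character_sets:
--         if type(char) != str:
--             return []
--     result = [""]
--     for _ in range(n):
--         result = [prefix + c for prefix in result for c in character_sets]
--     return result
-- ===== Notes on version B (the rewrite author's own statement) =====
-- stated objective: simpler
-- what changed: Replaced the recursive helper with mutable accumulator list by an iterative level-by-level rebuild: start from [""] and n times replace the result with every prefix extended by every character set.
-- outside the precondition, e.g. on find_all_possible_strings([], -1): A returns [], B returns ['']
import Mathlib
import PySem

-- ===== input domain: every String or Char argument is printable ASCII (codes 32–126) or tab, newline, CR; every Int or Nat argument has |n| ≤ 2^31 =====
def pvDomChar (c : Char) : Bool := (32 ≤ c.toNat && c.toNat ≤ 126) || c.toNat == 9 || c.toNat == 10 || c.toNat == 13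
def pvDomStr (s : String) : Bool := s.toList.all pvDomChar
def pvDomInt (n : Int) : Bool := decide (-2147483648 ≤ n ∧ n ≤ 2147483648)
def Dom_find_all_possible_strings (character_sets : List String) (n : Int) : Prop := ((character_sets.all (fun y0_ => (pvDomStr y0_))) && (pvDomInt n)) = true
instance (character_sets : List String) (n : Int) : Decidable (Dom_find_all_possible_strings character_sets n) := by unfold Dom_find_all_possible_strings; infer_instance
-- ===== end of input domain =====

-- B replaces A's recursive helper (mutated accumulator list) by an iterative level-by-level rebuild of the result; same cost, simpler.

-- ===== PORT A =====
-- recursive helper; n is taken as a Nat (Pre_ restricts to 0 ≤ n: on negative n with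
-- nonempty character_sets the Python recursion never terminates)
def character_combo (character_sets : List String) (n : Nat) (result : List String)
    (pre : String) (length : Int) : List String :=
  match n with
  | 0 => result ++ [pre]
  | m + 1 =>
      (PySem.List.pyRange 0 length 1).foldl
        (fun res x =>
          character_combo character_sets m res (pre ++ PySem.List.pyGetD character_sets x "") length)
        result

def find_all_possible_strings (character_sets : List String) (n : Int) : List String :=
  -- the Python type-check loop 'if type(char) != str: return []' can never fire on a List String
  character_combo character_sets n.toNat [] "" (PySem.List.len character_sets)

-- ===== PORT B =====
def find_all_possible_strings_alt (character_sets : List String) (n : Int) : List String :=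
  (PySem.List.pyRange 0 n 1).foldl
    (fun result _ => result.flatMap (fun pre => character_sets.map (fun c => pre ++ c)))
    [""]

-- ===== PRECONDITION & SPEC =====
-- Pre_ excludes negative n: there the Python A recurses without bound (RecursionError) for
-- nonempty character_sets, and for empty character_sets returns an accidental [] where B's
-- zero-iteration loop returns [""] — a corner no caller specifies.
def Pre_find_all_possible_strings (character_sets : List String) (n : Int) : Prop := 0 ≤ n
instance (character_sets : List String) (n : Int) : Decidable (Pre_find_all_possible_strings character_sets n) := by unfold Pre_find_all_possible_strings; infer_instance
def pvWitness_find_all_possible_strings : List String × Int := (["ab", "c"], 2)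

def Spec_find_all_possible_strings (character_sets : List String) (n : Int) (out : List String) : Prop := out = find_all_possible_strings_alt character_sets n
instance (character_sets : List String) (n : Int) (out : List String) : Decidable (Spec_find_all_possible_strings character_sets n out) := by unfold Spec_find_all_possible_strings; infer_instance

-- ===== CLAIM (what is proved, stated in full; the proofs are below) =====
def Claim_equal_find_all_possible_strings : Prop := ∀ (character_sets : List String) (n : Int), Dom_find_all_possible_strings character_sets n → Pre_find_all_possible_strings character_sets n → Spec_find_all_possible_strings character_sets n (find_all_possible_strings character_sets n)

-- ===== LEMMAS AND PROOFS =====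

-- reference enumeration: all concatenations of n picks from cs, appended to pre, in A's order
def pvAll (cs : List String) : Nat → String → List String
  | 0, p => [p]
  | m + 1, p => cs.flatMap (fun c => pvAll cs m (p ++ c))

theorem foldl_combo (cs : List String) (m : Nat)
    (ih : ∀ (r : List String) (p : String),
      character_combo cs m r p (PySem.List.len cs) = r ++ pvAll cs m p) :
    ∀ (ds : List String) (result : List String) (pre : String),
      List.foldl (fun res c => character_combo cs m res (pre ++ c) (PySem.List.len cs)) result ds
        = result ++ ds.flatMap (fun c => pvAll cs m (pre ++ c)) := by
  intro ds
  induction ds with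
  | nil => intro result pre; simp
  | cons c ds' ihd =>
      intro result pre
      simp only [List.foldl_cons, List.flatMap_cons]
      rw [ih, ihd, List.append_assoc]

theorem combo_eq (cs : List String) (n : Nat) :
    ∀ (result : List String) (pre : String),
      character_combo cs n result pre (PySem.List.len cs) = result ++ pvAll cs n pre := by
  induction n with
  | zero => intro result pre; simp [character_combo, pvAll]
  | succ m ih =>
      intro result pre
      rw [character_combo]
      have h := PySem.List.foldl_pyRange_pyGetD cs ""
        (fun res v => character_combo cs m res (pre ++ v) (PySem.List.len cs)) result
        (a := 0) (le_refl 0)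
      simp only [Int.toNat_zero, List.drop_zero] at h
      exact h.trans ((foldl_combo cs m ih cs result pre).trans (by simp [pvAll]))

theorem pvAll_snoc (cs : List String) (n : Nat) :
    ∀ (p : String),
      pvAll cs (n + 1) p = (pvAll cs n p).flatMap (fun q => cs.map (fun c => q ++ c)) := by
  induction n with
  | zero => intro p; simpa [pvAll] using (List.map_eq_flatMap (f := fun c => p ++ c) (l := cs)).symm
  | succ m ih =>
      intro p
      show cs.flatMap (fun c => pvAll cs (m + 1) (p ++ c))
        = List.flatMap (fun q => cs.map (fun c => q ++ c))
            (cs.flatMap (fun c => pvAll cs m (p ++ c)))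
      simp only [ih]
      exact (List.flatMap_assoc (l := cs) (f := fun c => pvAll cs m (p ++ c))
        (g := fun q => cs.map (fun c => q ++ c))).symm

theorem alt_eq (cs : List String) (k : Nat) :
    (List.range k).foldl
      (fun result _ => result.flatMap (fun pre => cs.map (fun c => pre ++ c))) [""]
      = pvAll cs k "" := by
  induction k with
  | zero => simp [pvAll]
  | succ m ih =>
      rw [List.range_succ, List.foldl_append, ih]
      simp only [List.foldl_cons, List.foldl_nil]
      exact (pvAll_snoc cs m "").symm

-- ===== VERDICT (by name: the statement is the Claim_ definition above) =====
theorem find_all_possible_strings_spec : Claim_equal_find_all_possible_strings := by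
  intro cs n _ hpre
  unfold Spec_find_all_possible_strings find_all_possible_strings find_all_possible_strings_alt
  rw [combo_eq, List.nil_append]
  lift n to Nat using hpre with k
  rw [PySem.List.pyRange_zero_natCast, List.foldl_map]
  simp only [Int.toNat_natCast]
  exact (alt_eq cs k).symm
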